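-- pv_equiv track=rewrite | github.com/Tenebriso/Advent-of-code | 2019/day16/part1.py | compute_element
-- ===== SOURCE A (Python) =====
-- pattern = [0, 1, 0, -1]
--
-- def compute_element(step, sequence):
--     step_pattern = [y for t in [[x] * step for x in pattern] for y in t]
--     shifted_pattern = step_pattern[1:]
--     shifted_pattern.append(step_pattern[0])
--     new_elem = 0
--     i = step - 1
--     while i < len(sequence):
--         to_add = shifted_pattern[i % len(step_pattern)] * sequence[i]
--         new_elem += to_add
--         if i == 0 and step != 1:
--             i += step - 1
--         else:
--             i += step
--     return abs(new_elem) % 10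
-- ===== SOURCE B (Python) =====
-- def compute_element(step, sequence):
--     total = 0
--     sign = 1
--     i = step - 1
--     while i < len(sequence):
--         total += sign * sequence[i]
--         sign = -sign
--         i += 2 * step
--     return abs(total) % 10
-- ===== Notes on version B (the rewrite author's own statement) =====
-- stated objective: simpler
-- what changed: B drops the pattern table entirely: since every second visited coefficient is 0 and the rest alternate +1/-1, B accumulates an alternating sum with stride 2*step and a sign toggle instead of building the repeated pattern list (length 4*step) and indexing it modulo its length on each of the step-stride visits.
import Mathlib
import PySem

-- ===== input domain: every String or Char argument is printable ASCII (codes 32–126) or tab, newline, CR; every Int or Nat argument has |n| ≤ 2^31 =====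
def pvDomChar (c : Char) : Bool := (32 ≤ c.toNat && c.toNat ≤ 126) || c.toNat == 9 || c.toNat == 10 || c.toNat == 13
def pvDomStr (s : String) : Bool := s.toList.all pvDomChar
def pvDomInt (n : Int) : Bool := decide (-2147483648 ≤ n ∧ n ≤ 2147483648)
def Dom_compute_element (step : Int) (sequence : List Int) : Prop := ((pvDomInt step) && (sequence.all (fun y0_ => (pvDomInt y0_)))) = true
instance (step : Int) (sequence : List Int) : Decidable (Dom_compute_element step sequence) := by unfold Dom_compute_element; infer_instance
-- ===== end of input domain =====

-- B replaces A's repeated-pattern table and modulo indexing by a plain alternating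
-- sum with stride 2*step (the even-numbered visits always hit coefficient 0): simpler.

-- ===== PORT A =====
def patternA : List Int := [0, 1, 0, -1]

def ceLoopA (step : Int) (seq shifted : List Int) (plen : Int) : Nat → Int → Int → Int
  | 0, _, acc => acc
  | fuel+1, i, acc =>
    if i < (seq.length : Int) then
      let acc' := acc + PySem.List.pyGetD shifted (PySem.Int.mod i plen) 0 * PySem.List.pyGetD seq i 0
      if i = 0 ∧ step ≠ 1 then ceLoopA step seq shifted plen fuel (i + (step - 1)) acc'
      else ceLoopA step seq shifted plen fuel (i + step) acc'
    else acc

def compute_element (step : Int) (sequence : List Int) : Int :=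
  let step_pattern := (patternA.map (fun x => List.replicate step.toNat x)).flatten
  let shifted_pattern := step_pattern.drop 1 ++ [PySem.List.pyGetD step_pattern 0 0]
  let r := ceLoopA step sequence shifted_pattern (step_pattern.length : Int)
            (sequence.length + 1) (step - 1) 0
  PySem.Int.mod |r| 10

-- ===== PORT B =====
def ceLoopB (step : Int) (seq : List Int) : Nat → Int → Int → Int → Int
  | 0, _, _, total => total
  | fuel+1, i, sign, total =>
    if i < (seq.length : Int) then
      ceLoopB step seq fuel (i + 2*step) (-sign) (total + sign * PySem.List.pyGetD seq i 0)
    else total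

def compute_element_alt (step : Int) (sequence : List Int) : Int :=
  PySem.Int.mod |ceLoopB step sequence (sequence.length + 1) (step - 1) 1 0| 10

-- ===== PRECONDITION & SPEC =====
-- Pre_ excludes step ≤ 0, where Python A raises IndexError (step_pattern is empty).
def Pre_compute_element (step : Int) (sequence : List Int) : Prop := 1 ≤ step
instance (step : Int) (sequence : List Int) : Decidable (Pre_compute_element step sequence) := by
  unfold Pre_compute_element; infer_instance

def pvWitness_compute_element : Int × List Int := (2, [3, -1, 4, 1, 5, 9, 2, 6])

def Spec_compute_element (step : Int) (sequence : List Int) (out : Int) : Prop := out = compute_element_alt step sequence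
instance (step : Int) (sequence : List Int) (out : Int) : Decidable (Spec_compute_element step sequence out) := by unfold Spec_compute_element; infer_instance

-- ===== CLAIM (what is proved, stated in full; the proofs are below) =====
def Claim_equal_compute_element : Prop := ∀ (step : Int) (sequence : List Int), Dom_compute_element step sequence → Pre_compute_element step sequence → Spec_compute_element step sequence (compute_element step sequence)

-- ===== LEMMAS AND PROOFS =====

-- step_pattern as four replicate blocks, and the shifted pattern
def spOf (t : Nat) : List Int :=
  List.replicate t 0 ++ (List.replicate t 1 ++ (List.replicate t 0 ++ (List.replicate t (-1) ++ [])))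

def shOf (t : Nat) : List Int := (spOf t).drop 1 ++ [0]

def sgn (m : Nat) : Int := if m % 4 = 1 then 1 else -1

lemma spOf_length (t : Nat) : (spOf t).length = 4 * t := by
  simp [spOf]; omega

lemma loopA_stop (step : Int) (seq shifted : List Int) (plen : Int) (fuel : Nat) (i acc : Int)
    (h : ¬ i < (seq.length : Int)) : ceLoopA step seq shifted plen fuel i acc = acc := by
  cases fuel <;> simp [ceLoopA, h]

lemma loopB_stop (step : Int) (seq : List Int) (fuel : Nat) (i sign total : Int)
    (h : ¬ i < (seq.length : Int)) : ceLoopB step seq fuel i sign total = total := by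
  cases fuel <;> simp [ceLoopB, h]

-- value of spOf at index r*t, r < 4
lemma spOf_getD (t r : Nat) (ht : 1 ≤ t) (hr : r < 4) :
    (spOf t).getD (r * t) 0 = (if r = 1 then 1 else if r = 3 then (-1 : Int) else 0) := by
  interval_cases r <;>
    simp [spOf, List.getD_eq_getElem?_getD, List.getElem?_append, List.getElem?_replicate] <;>
    split_ifs <;> simp_all <;> omega

-- value of shOf at an interior index
lemma shOf_getD_mid (t j : Nat) (hj : j + 1 < 4*t) :
    (shOf t).getD j 0 = (spOf t).getD (j+1) 0 := by
  have hlen : ((spOf t).drop 1).length = 4*t - 1 := by simp [spOf_length]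
  rw [shOf, List.getD_append _ _ _ _ (by omega)]
  simp [List.getD_eq_getElem?_getD]

lemma shOf_getD_last (t : Nat) : (shOf t).getD (4*t-1) 0 = 0 := by
  have hlen : ((spOf t).drop 1).length = 4*t - 1 := by simp [spOf_length]
  rw [shOf, List.getD_append_right _ _ _ _ (by omega)]
  simp

lemma neg_one_emod (n : Int) (h : 0 < n) : (-1) % n = n - 1 := by
  have h1 : (-1 : Int) = (n-1) + n*(-1) := by ring
  rw [h1, Int.add_mul_emod_self_left, Int.emod_eq_of_lt (by omega) (by omega)]

-- the coefficient A reads at position m*t-1 is pattern[m % 4]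
lemma coeff_lemma (t m : Nat) (ht : 1 ≤ t) :
    PySem.List.pyGetD (shOf t) (PySem.Int.mod ((m : Int) * t - 1) ((4 * t : Nat) : Int)) 0
      = (if m % 4 = 1 then 1 else if m % 4 = 3 then (-1 : Int) else 0) := by
  have h4 : (0:Int) < ((4*t:Nat):Int) := by exact_mod_cast (by omega : 0 < 4*t)
  rw [PySem.Int.mod_eq_emod_of_pos h4]
  have hmeq : (m:Int) = 4 * ((m/4 : Nat):Int) + ((m%4 : Nat):Int) := by
    exact_mod_cast (Nat.div_add_mod m 4).symm
  have hsplit : ((m:Int) * t - 1)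
      = (((m % 4 : Nat):Int) * t - 1) + ((4*t:Nat):Int) * ((m / 4 : Nat):Int) := by
    rw [hmeq]; push_cast; ring
  rw [hsplit, Int.add_mul_emod_self_left]
  have hr4 : m % 4 < 4 := Nat.mod_lt _ (by omega)
  by_cases h0 : m % 4 = 0
  · rw [h0]
    have hone : (((0:Nat):Int) * t - 1) = -1 := by simp
    rw [hone, neg_one_emod _ h4]
    have hcast : ((4*t:Nat):Int) - 1 = ((4*t-1 : Nat):Int) := by
      have : 1 ≤ 4*t := by omega
      push_cast [this]; ring
    rw [hcast, PySem.List.pyGetD_natCast, shOf_getD_last t]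
    simp
  · set r := m % 4 with hrdef
    have hr1 : 1 ≤ r := by omega
    have hrt1 : 1 ≤ r * t := by
      calc 1 ≤ 1 * 1 := by norm_num
      _ ≤ r * t := Nat.mul_le_mul hr1 ht
    have hrt4 : r * t < 4 * t := by
      have : r * t ≤ 3 * t := Nat.mul_le_mul_right t (by omega)
      omega
    have hidx : (((r:Nat):Int) * t - 1) = ((r*t - 1 : Nat):Int) := by
      push_cast [hrt1]; ring
    rw [hidx, Int.emod_eq_of_lt (by exact_mod_cast Nat.zero_le _) (by exact_mod_cast (by omega : r*t-1 < 4*t))]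
    rw [PySem.List.pyGetD_natCast]
    have hj : (r*t - 1) + 1 = r * t := by omega
    rw [shOf_getD_mid t (r*t-1) (by omega), hj, spOf_getD t r ht hr4]

lemma sgn_add_two (m : Nat) (hodd : m % 2 = 1) : sgn (m + 2) = - sgn m := by
  have h14 : m % 4 = 1 ∨ m % 4 = 3 := by omega
  rcases h14 with h | h <;> unfold sgn <;>
    · have h2 : (m+2) % 4 = 3 ∨ (m+2) % 4 = 1 := by omega
      simp [h]
      omega

-- main loop correspondence
lemma loops_eq (t : Nat) (ht : 1 ≤ t) (seq : List Int) :
    ∀ fuelA : Nat, ∀ (fuelB m : Nat) (acc : Int), 1 ≤ m → m % 2 = 1 →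
    (seq.length : Int) ≤ ((m : Int) * t - 1) + fuelA →
    (seq.length : Int) ≤ ((m : Int) * t - 1) + fuelB →
    ceLoopA (t : Int) seq (shOf t) ((4 * t : Nat) : Int) fuelA ((m : Int) * t - 1) acc
      = ceLoopB (t : Int) seq fuelB ((m : Int) * t - 1) (sgn m) acc := by
  intro fuelA
  induction fuelA using Nat.strong_induction_on with
  | _ fuelA IH =>
  intro fuelB m acc hm hodd hA hB
  have htI : (1:Int) ≤ (t:Int) := by exact_mod_cast ht
  have hmt : (t:Int) ≤ (m:Int) * t := le_mul_of_one_le_left (by omega) (by exact_mod_cast hm)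
  by_cases hlt : ((m:Int) * t - 1) < (seq.length : Int)
  · obtain ⟨fA, rfl⟩ := Nat.exists_eq_succ_of_ne_zero (show fuelA ≠ 0 by omega)
    obtain ⟨fB, rfl⟩ := Nat.exists_eq_succ_of_ne_zero (show fuelB ≠ 0 by omega)
    have hnot : ¬ (((m:Int) * t - 1) = 0 ∧ (t:Int) ≠ 1) := by
      rintro ⟨h0, h1⟩
      have hmt1 : m * t = 1 := by exact_mod_cast (show ((m*t : Nat):Int) = 1 by push_cast; omega)
      have ht1 : t = 1 := Nat.eq_one_of_dvd_one ⟨m, by rw [Nat.mul_comm t m]; omega⟩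
      exact h1 (by exact_mod_cast congrArg (Nat.cast : Nat → Int) ht1)
    have e1' : ((m+1 : Nat):Int) * t = ((m:Int) + 1) * t := by norm_cast
    have e2' : ((m+2 : Nat):Int) * t = ((m:Int) + 2) * t := by norm_cast
    have e1'' : ((m:Int) + 1) * t = (m:Int) * t + t := by ring
    have e2'' : ((m:Int) + 2) * t = (m:Int) * t + 2 * t := by ring
    have h14 : m % 4 = 1 ∨ m % 4 = 3 := by omega
    have hcoeff := coeff_lemma t m ht
    have hsgnv : (if m % 4 = 1 then (1:Int) else if m % 4 = 3 then (-1 : Int) else 0) = sgn m := by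
      rcases h14 with h | h <;> simp [sgn, h]
    simp only [ceLoopA, ceLoopB, if_pos hlt, if_neg hnot, hcoeff, hsgnv]
    set v := PySem.List.pyGetD seq ((m:Int) * t - 1) 0
    set acc' := acc + sgn m * v with hacc'
    have hstep1 : ((m:Int) * t - 1) + (t:Int) = ((m+1 : Nat):Int) * t - 1 := by push_cast; ring
    have hstep2 : ((m:Int) * t - 1) + 2 * (t:Int) = ((m+2 : Nat):Int) * t - 1 := by push_cast; ring
    rw [hstep1]
    by_cases hlt2 : (((m+1 : Nat):Int) * t - 1) < (seq.length : Int)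
    · obtain ⟨fA', rfl⟩ := Nat.exists_eq_succ_of_ne_zero (show fA ≠ 0 by
        push_cast at hA hlt2 ⊢; omega)
      have hnot2 : ¬ ((((m+1 : Nat):Int) * t - 1) = 0 ∧ (t:Int) ≠ 1) := by
        rintro ⟨h0, -⟩
        omega
      have hc2 := coeff_lemma t (m+1) ht
      have hc20 : (if (m+1) % 4 = 1 then (1:Int) else if (m+1) % 4 = 3 then (-1 : Int) else 0) = 0 := by
        have : (m+1) % 4 = 2 ∨ (m+1) % 4 = 0 := by omega
        rcases this with h | h <;> simp [h]
      rw [hc20] at hc2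
      simp only [ceLoopA, if_pos hlt2, if_neg hnot2, hc2, zero_mul, add_zero]
      have hstep3 : (((m+1 : Nat):Int) * t - 1) + (t:Int) = ((m+2 : Nat):Int) * t - 1 := by push_cast; ring
      rw [hstep3, hstep2, ← sgn_add_two m hodd]
      exact IH fA' (by omega) fB (m+2) acc' (by omega) (by omega) (by omega) (by omega)
    · rw [loopA_stop _ _ _ _ _ _ _ hlt2, hstep2, loopB_stop _ _ _ _ _ _ (by omega)]
  · rw [loopA_stop _ _ _ _ _ _ _ hlt, loopB_stop _ _ _ _ _ _ hlt]

lemma spOf_pyGetD_zero (t : Nat) (ht : 1 ≤ t) : PySem.List.pyGetD (spOf t) 0 0 = 0 := by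
  obtain ⟨t', rfl⟩ := Nat.exists_eq_succ_of_ne_zero (show t ≠ 0 by omega)
  simp [spOf, List.replicate_succ, PySem.List.pyGetD_zero_cons]

lemma flatten_eq_spOf (t : Nat) :
    ((patternA.map (fun x => List.replicate t x)).flatten) = spOf t := by
  simp [patternA, spOf]

-- ===== VERDICT (by name: the statement is the Claim_ definition above) =====
theorem compute_element_spec : Claim_equal_compute_element := by
  unfold Claim_equal_compute_element Spec_compute_element Pre_compute_element
  intro step seq _hd hpre
  unfold compute_element compute_element_alt
  set t := step.toNat with htdef
  have ht : 1 ≤ t := by omega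
  have hstep : step = (t:Int) := by omega
  simp only [flatten_eq_spOf, hstep, spOf_pyGetD_zero t ht]
  have hlen : (((spOf t).length : Nat) : Int) = ((4 * t : Nat) : Int) := by
    rw [spOf_length]
  rw [hlen]
  have hone : (t:Int) - 1 = ((1 : Nat):Int) * t - 1 := by push_cast; ring
  rw [hone, show List.drop 1 (spOf t) ++ [0] = shOf t from rfl]
  have e0 : ((1 : Nat):Int) * t = (t:Int) := by push_cast; ring
  have h := loops_eq t ht seq (seq.length + 1) (seq.length + 1) 1 0
    (by omega) (by omega) (by omega) (by omega)
  rw [h]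
  simp [sgn]
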